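-- pv_equiv track=rewrite | github.com/kyleleelarson/Brieskorn-spheres | continued_fractions.py | cont_frac
-- ===== SOURCE A (Python) =====
-- def cont_frac(p,q): #assumes p>|q|>0
-- 	neg = False
-- 	if q < 0: #handle negative fractions
-- 		neg = True
-- 		q = -1*q
-- 	l = []
-- 	while q > 1:
-- 		a = p//q + 1
-- 		l.append(a)
-- 		temp = q
-- 		q = q*a - p
-- 		p = temp
-- 	l.append(p)
-- 	if neg == True:
-- 		l = [-1*e for e in l]
-- 	return l
-- ===== SOURCE B (Python) =====
-- def cont_frac(p, q):
--     # sign handled once at the top; runs of 2's are emitted in bulk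
--     if q < 0:
--         return [-e for e in _hj(p, -q)]
--     return _hj(p, q)
--
-- def _hj(p, q):
--     out = []
--     while q > 1:
--         a = p // q + 1
--         if a == 2:
--             # a stays 2 while the gap d = p - q persists: emit the whole run at once
--             d = p - q
--             t = (q - 1) // d
--             out.extend([2] * t)
--             p, q = q - (t - 1) * d, q - t * d
--         else:
--             out.append(a)
--             p, q = q, q * a - p
--     out.append(p)
--     return out
-- ===== Notes on version B (the rewrite author's own statement) =====
-- stated objective: alternative
-- what changed: Replaced A's one-division-per-term while loop by a loop that detects a run of quotient-2 terms and emits the whole run at once via t = (q-1)//d, with the sign handled once at the top instead of a neg flag.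
import Mathlib
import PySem

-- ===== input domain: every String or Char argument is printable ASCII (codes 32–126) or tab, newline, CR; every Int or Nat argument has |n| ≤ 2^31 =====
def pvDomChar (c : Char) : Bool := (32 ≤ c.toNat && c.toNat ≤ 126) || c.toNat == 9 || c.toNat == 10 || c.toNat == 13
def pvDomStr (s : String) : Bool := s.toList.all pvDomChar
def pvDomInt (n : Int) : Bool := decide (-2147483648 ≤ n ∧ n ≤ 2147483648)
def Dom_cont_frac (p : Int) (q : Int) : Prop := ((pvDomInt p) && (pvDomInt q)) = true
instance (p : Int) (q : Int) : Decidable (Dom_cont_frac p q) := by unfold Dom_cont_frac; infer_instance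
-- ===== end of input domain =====

-- B replaces A's one-division-per-term loop by a loop that emits each run of 2's in bulk
-- (t = (q-1)//d terms at once), with the sign handled once at the top; objective: alternative.

-- ===== PORT A =====
-- the while loop; fuel q.toNat+1 suffices on Pre_ (q strictly decreases each iteration there)
def contFracLoop : Nat → Int → Int → List Int → List Int
  | 0, p, _q, l => l ++ [p]
  | (f+1), p, q, l =>
    if q > 1 then
      let a := PySem.Int.floordiv p q + 1
      contFracLoop f q (q * a - p) (l ++ [a])
    else l ++ [p]

def cont_frac (p : Int) (q : Int) : List Int :=
  let neg : Bool := q < 0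
  let q1 := if q < 0 then -1 * q else q
  let l := contFracLoop (q1.toNat + 1) p q1 []
  if neg then l.map (fun e => -1 * e) else l

-- ===== PORT B =====
-- Source B's loop: runs of 2's emitted in bulk; fuel q.toNat+1 suffices on Pre_
def hjLoop : Nat → Int → Int → List Int → List Int
  | 0, p, _q, out => out ++ [p]
  | (f+1), p, q, out =>
    if q > 1 then
      let a := PySem.Int.floordiv p q + 1
      if a = 2 then
        let d := p - q
        let t := PySem.Int.floordiv (q - 1) d
        hjLoop f (q - (t - 1) * d) (q - t * d) (out ++ List.replicate t.toNat 2)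
      else
        hjLoop f q (q * a - p) (out ++ [a])
    else out ++ [p]

def cont_frac_alt (p : Int) (q : Int) : List Int :=
  if q < 0 then (hjLoop ((-q).toNat + 1) p (-q) []).map (fun e => -e)
  else hjLoop (q.toNat + 1) p q []

-- ===== PRECONDITION & SPEC =====
-- A's while loop diverges whenever q ≠ 0 and gcd(p,q) ≠ 1 (the state reaches q | p with q > 1
-- and then never changes); Pre_ is exactly the inputs on which the Python A returns.
def Pre_cont_frac (p : Int) (q : Int) : Prop := q = 0 ∨ Int.gcd p q = 1
instance (p : Int) (q : Int) : Decidable (Pre_cont_frac p q) := by unfold Pre_cont_frac; infer_instance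
def pvWitness_cont_frac : Int × Int := (7, 5)

def Spec_cont_frac (p : Int) (q : Int) (out : List Int) : Prop := out = cont_frac_alt p q
instance (p : Int) (q : Int) (out : List Int) : Decidable (Spec_cont_frac p q out) := by unfold Spec_cont_frac; infer_instance

-- ===== CLAIM (what is proved, stated in full; the proofs are below) =====
def Claim_equal_cont_frac : Prop := ∀ (p : Int) (q : Int), Dom_cont_frac p q → Pre_cont_frac p q → Spec_cont_frac p q (cont_frac p q)

-- ===== LEMMAS AND PROOFS =====

-- common reference function: one HJ term per step, total by well-founded recursion on q
-- (the `p % q = 0` guard is never reached when gcd p q = 1)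
def hjF (p q : Int) : List Int :=
  if h : 1 < q then
    if h2 : p % q = 0 then [p]
    else (p / q + 1) :: hjF q (q - p % q)
  else [p]
termination_by q.toNat
decreasing_by
  have h0 : 0 ≤ p % q := Int.emod_nonneg p (by omega)
  have h1 : p % q < q := Int.emod_lt_of_pos p (by omega)
  omega

theorem hjF_base (p q : Int) (h : ¬ 1 < q) : hjF p q = [p] := by
  rw [hjF]; simp [h]

theorem hjF_step (p q : Int) (h : 1 < q) (h2 : p % q ≠ 0) :
    hjF p q = (p / q + 1) :: hjF q (q - p % q) := by
  rw [hjF]; simp [h, h2]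

theorem gcd_of_dvd (p q : Int) (hdvd : q ∣ p) : Int.gcd p q = q.natAbs := by
  simp [Int.gcd, Nat.gcd_eq_right (Int.natAbs_dvd_natAbs.mpr hdvd)]

theorem gcd_step (p q : Int) (h : 1 < q) (hg : Int.gcd p q = 1) :
    Int.gcd q (q - p % q) = 1 := by
  have h1 : q - p % q = -p + (1 + p / q) * q := by
    linear_combination (-1 : ℤ) * Int.ediv_add_emod p q
  rw [h1, Int.gcd_add_mul_right_right q (-p) (1 + p / q)]
  simp only [Int.gcd, Int.natAbs_neg]
  rw [Nat.gcd_comm]; exact hg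

theorem emod_ne_zero (p q : Int) (h : 1 < q) (hg : Int.gcd p q = 1) : p % q ≠ 0 := by
  intro h0
  have hdvd : q ∣ p := Int.dvd_of_emod_eq_zero h0
  have := gcd_of_dvd p q hdvd
  omega

theorem step_eq (p q : Int) (h : 1 < q) :
    q * (PySem.Int.floordiv p q + 1) - p = q - p % q := by
  rw [PySem.Int.floordiv_eq_ediv_of_pos (by omega)]
  have := Int.ediv_add_emod p q
  nlinarith [this]

-- A's fueled loop computes hjF given enough fuel (on Pre_)
theorem contFracLoop_eq (f : Nat) : ∀ (p q : Int) (l : List Int),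
    0 ≤ q → Int.gcd p q = 1 ∨ q = 0 → q.toNat ≤ f →
    contFracLoop f p q l = l ++ hjF p q := by
  induction f with
  | zero =>
    intro p q l h0 _ hf
    have : ¬ 1 < q := by omega
    rw [contFracLoop, hjF_base _ _ this]
  | succ f ih =>
    intro p q l h0 hg hf
    by_cases h : 1 < q
    · have hg1 : Int.gcd p q = 1 := by rcases hg with hg | hg; exact hg; omega
      have hm := emod_ne_zero p q h hg1
      have hm0 : 0 ≤ p % q := Int.emod_nonneg p (by omega)
      have hm1 : p % q < q := Int.emod_lt_of_pos p (by omega)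
      rw [contFracLoop]
      simp only [if_pos h]
      rw [step_eq p q h, ih q (q - p % q) _ (by omega) (Or.inl (gcd_step p q h hg1)) (by omega)]
      rw [hjF_step p q h hm, PySem.Int.floordiv_eq_ediv_of_pos (by omega)]
      simp
    · rw [contFracLoop]
      simp only [if_neg h]
      rw [hjF_base _ _ h]

-- a run of 2's, unrolled k at a time:
-- if q ≤ p < 2q (so the term is 2) with d = p - q ≥ 1 and k = (q-1)/d,
-- then hjF emits k twos and lands on the stated state, which still satisfies the invariant
theorem hjF_run (k : Nat) : ∀ (p q : Int), 1 < q → Int.gcd p q = 1 →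
    q ≤ p → p < 2 * q → (q - 1) / (p - q) = (k : Int) →
    hjF p q = List.replicate k 2 ++ hjF (q - ((k : Int) - 1) * (p - q)) (q - (k : Int) * (p - q)) ∧
    Int.gcd (q - ((k : Int) - 1) * (p - q)) (q - (k : Int) * (p - q)) = 1 ∧
    0 ≤ q - (k : Int) * (p - q) ∧ q - (k : Int) * (p - q) < q := by
  induction k with
  | zero =>
    intro p q h hg hle hlt hk
    exfalso
    -- d ≥ 1, so (q-1)/d ≥ 1: k = 0 is impossible
    have hd : p - q ≠ 0 := by
      intro h0
      have hdvd : q ∣ p := ⟨1, by omega⟩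
      have := gcd_of_dvd p q hdvd
      omega
    have hd1 : 1 ≤ p - q := by omega
    have : 1 ≤ (q - 1) / (p - q) := Int.le_ediv_iff_mul_le (by omega) |>.mpr (by omega)
    omega
  | succ k ih =>
    intro p q h hg hle hlt hk
    have hd : p - q ≠ 0 := by
      intro h0
      have hdvd : q ∣ p := ⟨1, by omega⟩
      have := gcd_of_dvd p q hdvd
      omega
    have hd1 : 1 ≤ p - q := by omega
    have hmod : p % q = p - q := by
      rw [← Int.sub_emod_right p q]; exact Int.emod_eq_of_lt (by omega) (by omega)
    have hdiv : p / q = 1 := by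
      have := Int.ediv_add_emod p q
      rw [hmod] at this; nlinarith [this]
    have hstep := hjF_step p q h (by rw [hmod]; omega)
    rw [hmod, hdiv] at hstep
    -- bounds from k+1 = (q-1)/d : (k+1)d ≤ q-1 < (k+2)d
    have hkd : ((k : Int) + 1) * (p - q) ≤ q - 1 ∧ q - 1 < ((k : Int) + 2) * (p - q) := by
      constructor
      · have := Int.ediv_mul_le (q - 1) hd
        calc ((k : Int) + 1) * (p - q) = (q - 1) / (p - q) * (p - q) := by rw [hk]; push_cast; ring
          _ ≤ q - 1 := Int.ediv_mul_le (q - 1) hd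
      · have := Int.lt_ediv_add_one_mul_self (q - 1) (show 0 < p - q by omega)
        calc q - 1 < ((q - 1) / (p - q) + 1) * (p - q) := this
          _ = ((k : Int) + 2) * (p - q) := by rw [hk]; push_cast; ring
    have hgcd' : Int.gcd q (q - (p - q)) = 1 := by
      have := gcd_step p q h hg; rwa [hmod] at this
    by_cases hk1 : k = 0
    · -- single 2: recursion bottoms out at state (q, q - d)
      subst hk1
      refine ⟨?_, ?_, ?_, ?_⟩
      · rw [hstep]; push_cast; ring_nf; simp
      · push_cast; ring_nf; ring_nf at hgcd'; exact hgcd'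
      · push_cast; omega
      · push_cast; omega
    · -- k ≥ 1: next state still in the 2-run; apply ih at (q, q - d)
      have hk1' : 1 ≤ (k : Int) := by exact_mod_cast Nat.one_le_iff_ne_zero.mpr hk1
      have hq' : 1 < q - (p - q) := by
        have := hkd.1; nlinarith
      have hle' : q - (p - q) ≤ q := by omega
      have hlt' : q < 2 * (q - (p - q)) := by
        have := hkd.1
        nlinarith
      have hd' : q - (q - (p - q)) = p - q := by ring
      have hk' : ((q - (p - q)) - 1) / (q - (q - (p - q))) = (k : Int) := by
        rw [hd']
        have : (q - (p - q)) - 1 = (q - 1) + (-1) * (p - q) := by ring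
        rw [this, Int.add_mul_ediv_right _ _ hd, hk]
        push_cast; ring
      obtain ⟨ha, hb, hc, hdd⟩ := ih q (q - (p - q)) hq' hgcd' hle' hlt' hk'
      rw [hd'] at ha hb hc hdd
      refine ⟨?_, ?_, ?_, ?_⟩
      · rw [hstep, ha]
        have e1 : q - (p - q) - ((k : Int) - 1) * (p - q) = q - (((k : Int) + 1) - 1) * (p - q) := by ring
        have e2 : q - (p - q) - (k : Int) * (p - q) = q - ((k : Int) + 1) * (p - q) := by ring
        rw [e1, e2]
        push_cast
        simp [List.replicate_succ]
      · push_cast at hb ⊢; ring_nf at hb ⊢; exact hb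
      · push_cast at hc ⊢
        have e : q - ((k : Int) + 1) * (p - q) = q - (p - q) - (k : Int) * (p - q) := by ring
        rw [e]; exact hc
      · push_cast at hdd ⊢
        have e : q - ((k : Int) + 1) * (p - q) = q - (p - q) - (k : Int) * (p - q) := by ring
        rw [e]; omega

-- B's fueled loop computes hjF given enough fuel (on Pre_)
theorem hjLoop_eq (f : Nat) : ∀ (p q : Int) (out : List Int),
    0 ≤ q → Int.gcd p q = 1 ∨ q = 0 → q.toNat ≤ f →
    hjLoop f p q out = out ++ hjF p q := by
  induction f with
  | zero =>
    intro p q out h0 _ hf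
    have : ¬ 1 < q := by omega
    rw [hjLoop, hjF_base _ _ this]
  | succ f ih =>
    intro p q out h0 hg hf
    by_cases h : 1 < q
    · have hg1 : Int.gcd p q = 1 := by rcases hg with hg | hg; exact hg; omega
      have hm := emod_ne_zero p q h hg1
      have hm0 : 0 ≤ p % q := Int.emod_nonneg p (by omega)
      have hm1 : p % q < q := Int.emod_lt_of_pos p (by omega)
      rw [hjLoop]
      simp only [if_pos h]
      by_cases ha : PySem.Int.floordiv p q + 1 = 2
      · simp only [if_pos ha]
        have hdiv : p / q = 1 := by
          rw [PySem.Int.floordiv_eq_ediv_of_pos (by omega)] at ha; omega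
        have hle : q ≤ p := by
          have := Int.ediv_add_emod p q; rw [hdiv] at this; omega
        have hlt : p < 2 * q := by
          have := Int.ediv_add_emod p q; rw [hdiv] at this; omega
        have ht : PySem.Int.floordiv (q - 1) (p - q) = (q - 1) / (p - q) := by
          have hd : p - q ≠ 0 := by
            intro h0'
            have hdvd : q ∣ p := ⟨1, by omega⟩
            have := gcd_of_dvd p q hdvd
            omega
          exact PySem.Int.floordiv_eq_ediv_of_pos (by omega)
        have htnn : 0 ≤ (q - 1) / (p - q) := by
          apply Int.ediv_nonneg (by omega)
          have hd : p - q ≠ 0 := by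
            intro h0'
            have hdvd : q ∣ p := ⟨1, by omega⟩
            have := gcd_of_dvd p q hdvd
            omega
          omega
        set k : Nat := ((q - 1) / (p - q)).toNat with hkdef
        have hkint : (q - 1) / (p - q) = (k : Int) := by omega
        obtain ⟨ha', hb', hc', hd'⟩ := hjF_run k p q h hg1 hle hlt hkint
        rw [ht, hkint]
        have htoNat : ((k : Int)).toNat = k := by omega
        rw [htoNat]
        rw [ih (q - ((k : Int) - 1) * (p - q)) (q - (k : Int) * (p - q)) _ hc' (Or.inl hb') (by omega)]
        rw [ha']
        simp
      · simp only [if_neg ha]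
        rw [step_eq p q h, ih q (q - p % q) _ (by omega) (Or.inl (gcd_step p q h hg1)) (by omega)]
        rw [hjF_step p q h hm]
        have : PySem.Int.floordiv p q + 1 = p / q + 1 := by
          rw [PySem.Int.floordiv_eq_ediv_of_pos (by omega)]
        rw [← this]
        simp
    · rw [hjLoop]
      simp only [if_neg h]
      rw [hjF_base _ _ h]

-- ===== VERDICT (by name: the statement is the Claim_ definition above) =====
theorem cont_frac_spec : Claim_equal_cont_frac := by
  intro p q _ hpre
  unfold Spec_cont_frac cont_frac cont_frac_alt
  rcases lt_trichotomy q 0 with hq | hq | hq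
  · -- negative q: both compute on -q and negate the whole list
    have hq' : (0:Int) < -q := by omega
    have hg : Int.gcd p (-q) = 1 := by
      rcases hpre with h | h; omega
      simpa only [Int.gcd, Int.natAbs_neg] using h
    simp only [if_pos hq, decide_eq_true_eq]
    have e1 : -1 * q = -q := by ring
    rw [e1]
    rw [contFracLoop_eq ((-q).toNat + 1) p (-q) [] (by omega) (Or.inl hg) (by omega)]
    rw [hjLoop_eq ((-q).toNat + 1) p (-q) [] (by omega) (Or.inl hg) (by omega)]
    simp only [List.nil_append]
    apply List.map_congr_left
    intro x _; ring
  · -- q = 0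
    subst hq
    simp [contFracLoop, hjLoop]
  · -- positive q
    have hg : Int.gcd p q = 1 := by rcases hpre with h | h; omega; exact h
    have hnneg : ¬ (q < 0) := by omega
    simp only [if_neg hnneg, decide_eq_true_eq]
    rw [contFracLoop_eq (q.toNat + 1) p q [] (by omega) (Or.inl hg) (by omega)]
    rw [hjLoop_eq (q.toNat + 1) p q [] (by omega) (Or.inl hg) (by omega)]
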